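-- pv_equiv track=rewrite | github.com/AdrianoCarvalh0/texture_codes | modules/Slice_mapper/slice_mapper_util.py | order_ridge_vertices
-- ===== SOURCE A (Python) =====
-- def order_ridge_vertices(idx_vertices):
--     """Ordena os vértices das arestas mediais de Voronoi. Uma lista de arestas mediais de Voronoi, que não estão ordenados, são passados
--     como parâmetro e na execução da função temos a ordenação destes vértices que definem um caminho por partes.
--
--     Parâmetros:
--     -----------
--     idx_vertices: ndarray, int
--         índices dos vértices
--     Retorno:
--     -----------
--     ordered_vertices: ndarray, int
--         vértices ordenados
--     """
--
--     idx_vertices = list(map(tuple, idx_vertices))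
--     vertice_ridge_map = {}
--     last_vertex = -1
--     for idx_ridge, (idx_v1, idx_v2) in enumerate(idx_vertices):
--         if idx_v1 in vertice_ridge_map:
--             vertice_ridge_map[idx_v1].append(idx_ridge)
--         else:
--             vertice_ridge_map[idx_v1] = [idx_ridge]
--
--         if idx_v2 in vertice_ridge_map:
--             vertice_ridge_map[idx_v2].append(idx_ridge)
--         else:
--             vertice_ridge_map[idx_v2] = [idx_ridge]
--
--     for idx_vertex, indices_ridge in vertice_ridge_map.items():
--         if len(indices_ridge) == 1:
--             idx_first_vertex = idx_vertex
--             break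
--
--     ordered_vertices = [idx_first_vertex]
--     idx_ridge = vertice_ridge_map[idx_first_vertex][0]
--     idx_v1, idx_v2 = idx_vertices[idx_ridge]
--     if idx_v1 == idx_first_vertex:
--         idx_vertex = idx_v2
--     else:
--         idx_vertex = idx_v1
--     ordered_vertices.append(idx_vertex)
--     prev_idx_ridge = idx_ridge
--     prev_idx_vertex = idx_vertex
--     while True:
--         indices_ridge = vertice_ridge_map[idx_vertex]
--         if len(indices_ridge) == 1:
--             break
--         if indices_ridge[0] == prev_idx_ridge:
--             idx_ridge = indices_ridge[1]
--         else:
--             idx_ridge = indices_ridge[0]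
--         idx_v1, idx_v2 = idx_vertices[idx_ridge]
--         if idx_v1 == prev_idx_vertex:
--             idx_vertex = idx_v2
--         else:
--             idx_vertex = idx_v1
--
--         ordered_vertices.append(idx_vertex)
--         prev_idx_ridge = idx_ridge
--         prev_idx_vertex = idx_vertex
--
--     return ordered_vertices
-- ===== SOURCE B (Python) =====
-- def order_ridge_vertices(idx_vertices):
--     """Pick the start by counting vertex occurrences, then repeatedly consume
--     the first unused edge containing the current path end from a shrinking
--     pool of edges; stop when the pool holds no edge at the path end."""
--     edges = [tuple(e) for e in idx_vertices]
--     counts = {}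
--     for e in edges:
--         for v in e:
--             counts[v] = counts.get(v, 0) + 1
--     start = next(v for e in edges for v in e if counts[v] == 1)
--     remaining = list(edges)
--     path = [start]
--     cur = start
--     while True:
--         hit = next((i for i, e in enumerate(remaining)
--                     if e is not None and cur in e), None)
--         if hit is None:
--             break
--         a, b = remaining[hit]
--         remaining[hit] = None
--         cur = b if a == cur else a
--         path.append(cur)
--     return path
-- ===== Notes on version B (the rewrite author's own statement) =====
-- stated objective: alternative
-- what changed: A builds a vertex-to-incident-edge-index map, picks the first degree-1 key of that map, and walks it by taking at each vertex the ridge index different from the previous one; B keeps no incidence map at all: it counts vertex occurrences once to pick the start, then repeatedly scans a shrinking pool of unused edges for the first edge containing the current path end, consumes it, and stops when the pool holds no such edge.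
-- outside the precondition, e.g. on order_ridge_vertices([[0, 2], [0, 3], [3, 3]]): A returns [2, 0, 3, 3, 0, 2], B returns [2, 0, 3, 3]
import Mathlib
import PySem

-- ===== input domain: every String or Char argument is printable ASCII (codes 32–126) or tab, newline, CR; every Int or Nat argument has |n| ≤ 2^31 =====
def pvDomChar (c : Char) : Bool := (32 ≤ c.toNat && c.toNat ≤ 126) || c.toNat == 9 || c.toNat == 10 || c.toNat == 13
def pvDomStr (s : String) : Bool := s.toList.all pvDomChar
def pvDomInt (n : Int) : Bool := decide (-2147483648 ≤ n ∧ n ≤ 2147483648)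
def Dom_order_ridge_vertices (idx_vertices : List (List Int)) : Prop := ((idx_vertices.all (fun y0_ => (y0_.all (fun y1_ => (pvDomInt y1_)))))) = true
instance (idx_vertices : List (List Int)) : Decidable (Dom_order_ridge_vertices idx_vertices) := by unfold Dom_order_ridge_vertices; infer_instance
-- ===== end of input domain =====

-- B abandons A's vertex→incident-edge-index map and its walk by "the ridge different from the
-- previous one": it counts vertex occurrences once to pick the start, then repeatedly consumes
-- the first unused edge containing the path end from a shrinking pool; objective: alternative.

-- ===== PORT A =====
-- A builds vertex → list of incident ridge (edge) indices with an if-in/append/else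
-- pattern (= dict modify with default []), finds the first vertex with exactly one
-- incident ridge in insertion order, then walks: at each vertex take the incident
-- ridge that is not the previous one, look the edge up in idx_vertices, and move to
-- its other endpoint.  The 'while True' loop is ported with fuel (length+1, enough on
-- every input Pre_ admits; on fuel exhaustion the accumulator is returned).  List
-- unpacking of a non-pair edge and the no-degree-1-vertex case raise in Python
-- (ValueError / NameError); both are outside Pre_ and ported with a default.
def pvA_build (d : PySem.Dict Int (List Int)) (p : Int × List Int) : PySem.Dict Int (List Int) :=
  match p.2 with
  | [a, b] => (d.modify a [] (· ++ [p.1])).modify b [] (· ++ [p.1])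
  | _ => d   -- Python: ValueError on unpacking; outside Pre_

def pvA_loop (idx_vertices : List (List Int)) (vrm : PySem.Dict Int (List Int)) :
    Nat → List Int → Int → Int → List Int
  | 0, acc, _, _ => acc        -- fuel exhausted; unreachable under Pre_
  | fuel+1, acc, prevRidge, curV =>
    let indices := vrm.getD curV []
    if indices.length == 1 then acc
    else
      let r := if indices.getD 0 0 == prevRidge then indices.getD 1 0 else indices.getD 0 0
      let e := PySem.List.pyGetD idx_vertices r []
      let v := if e.getD 0 0 == curV then e.getD 1 0 else e.getD 0 0
      pvA_loop idx_vertices vrm fuel (acc ++ [v]) r v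

def order_ridge_vertices (idx_vertices : List (List Int)) : List Int :=
  let vrm := (PySem.List.enumerate idx_vertices).foldl pvA_build PySem.Dict.empty
  match vrm.items.find? (fun kv => kv.2.length == 1) with
  | none => []                 -- Python: NameError (no degree-1 vertex); outside Pre_
  | some (s, ridges) =>
    let r0 := ridges.getD 0 0
    let e := PySem.List.pyGetD idx_vertices r0 []
    let v := if e.getD 0 0 == s then e.getD 1 0 else e.getD 0 0
    pvA_loop idx_vertices vrm (idx_vertices.length + 1) [s, v] r0 v

-- ===== PORT B =====
-- B counts vertex occurrences in a dict (counts[v] = counts.get(v,0)+1), takes as start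
-- the first vertex of the flattened edge list whose count is 1, then repeatedly scans the
-- pool 'remaining' (the edges, consumed entries set to None = none) for the FIRST entry
-- that is not None and contains the current path end; it consumes that edge, crosses to
-- its other endpoint, and stops when the scan finds nothing.  The 'while True' loop is
-- ported with fuel (length+2, enough on every input Pre_ admits).  Unpacking a non-pair
-- edge and the empty start generator raise in Python (ValueError / StopIteration); both
-- are outside Pre_ and ported with a default.
def pvB_loop : Nat → List (Option (List Int)) → List Int → Int → List Int
  | 0, _, path, _ => path      -- fuel exhausted; unreachable under Pre_
  | fuel+1, remaining, path, cur =>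
    match (PySem.List.enumerate remaining).find?
        (fun p => match p.2 with | some e => decide (cur ∈ e) | none => false) with
    | none => path
    | some (i, oe) =>
      match oe with
      | some [a, b] =>
        let remaining' := remaining.set i.toNat none
        let cur' := if a == cur then b else a
        pvB_loop fuel remaining' (path ++ [cur']) cur'
      | _ => path              -- Python: ValueError on unpacking; outside Pre_

def order_ridge_vertices_alt (idx_vertices : List (List Int)) : List Int :=
  let counts := idx_vertices.foldl
    (fun d e => e.foldl (fun d v => d.insert v (d.getD v (0 : Int) + 1)) d) PySem.Dict.empty
  match idx_vertices.flatten.find? (fun v => counts.getD v 0 == 1) with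
  | none => []                 -- Python: StopIteration; outside Pre_
  | some s => pvB_loop (idx_vertices.length + 2) (idx_vertices.map some) [s] s

-- ===== PRECONDITION & SPEC =====
-- Pre_ excludes the inputs where Python A raises (an edge that is not a pair →
-- ValueError; no degree-1 vertex → NameError) and, beyond that, edge lists with a
-- vertex of degree > 2: there A's ridge-index tie-breaking is accidental to its
-- implementation (the walk can even loop forever), so nothing is claimed about them.
def Pre_order_ridge_vertices (idx_vertices : List (List Int)) : Prop :=
  (∀ e ∈ idx_vertices, e.length = 2) ∧
  (∀ v ∈ idx_vertices.flatten, idx_vertices.flatten.count v ≤ 2) ∧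
  (∃ v ∈ idx_vertices.flatten, idx_vertices.flatten.count v = 1)
instance (idx_vertices : List (List Int)) : Decidable (Pre_order_ridge_vertices idx_vertices) := by
  unfold Pre_order_ridge_vertices; infer_instance

def pvWitness_order_ridge_vertices : List (List Int) := [[0, 1], [1, 2], [2, 3]]

def Spec_order_ridge_vertices (idx_vertices : List (List Int)) (out : List Int) : Prop := out = order_ridge_vertices_alt idx_vertices
instance (idx_vertices : List (List Int)) (out : List Int) : Decidable (Spec_order_ridge_vertices idx_vertices out) := by unfold Spec_order_ridge_vertices; infer_instance

-- ===== CLAIM (what is proved, stated in full; the proofs are below) =====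
def Claim_equal_order_ridge_vertices : Prop := ∀ (idx_vertices : List (List Int)), Dom_order_ridge_vertices idx_vertices → Pre_order_ridge_vertices idx_vertices → Spec_order_ridge_vertices idx_vertices (order_ridge_vertices idx_vertices)

-- ===== LEMMAS AND PROOFS =====

-- (vertex, ridge index) incidence pairs, in the order A's build loop inserts them
def pvPairsA (l : List (Int × List Int)) : List (Int × Int) :=
  l.flatMap (fun p => match p.2 with | [a, b] => [(a, p.1), (b, p.1)] | _ => [])

def pvStep (d : PySem.Dict Int (List Int)) (q : Int × Int) : PySem.Dict Int (List Int) :=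
  d.modify q.1 [] (· ++ [q.2])

-- list of ridge indices incident to v (the value A's dict holds at v)
def pvRidgeL (edges : List (List Int)) (v : Int) : List Int :=
  ((pvPairsA (PySem.List.enumerate edges)).filter (fun q => q.1 == v)).map (·.2)

lemma pvPairsA_cons (p : Int × List Int) (l : List (Int × List Int)) :
    pvPairsA (p :: l) =
      (match p.2 with | [a, b] => [(a, p.1), (b, p.1)] | _ => []) ++ pvPairsA l := by
  simp [pvPairsA]

lemma pvA_build_pairs (l : List (Int × List Int)) :
    ∀ d, l.foldl pvA_build d = (pvPairsA l).foldl pvStep d := by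
  induction l with
  | nil => intro d; rfl
  | cons p l ih =>
    intro d
    rcases p with ⟨i, e⟩
    rcases e with _ | ⟨a, _ | ⟨b, _ | ⟨c, t⟩⟩⟩ <;>
      simp [pvA_build, pvPairsA_cons, pvStep, ih]

lemma pvStep_getD (pl : List (Int × Int)) (d : PySem.Dict Int (List Int)) (v : Int) :
    (pl.foldl pvStep d).getD v [] = d.getD v [] ++ (pl.filter (fun q => q.1 == v)).map (·.2) := by
  simpa [pvStep] using PySem.Dict.getD_foldl_modify_append pl d v

lemma pvNodup_fold (pl : List (Int × Int)) (d : PySem.Dict Int (List Int))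
    (h : d.keys.Nodup) : (pl.foldl pvStep d).keys.Nodup :=
  PySem.Dict.nodup_keys_foldl_modify_key pl (·.1) [] (fun _ x => (· ++ [x.2])) d h

lemma pvEnum_coherent (xs : List (List Int)) :
    ∀ (pre : List (List Int)) p, p ∈ PySem.List.enumerate xs (pre.length : Int) →
      PySem.List.pyGetD (pre ++ xs) p.1 [] = p.2 := by
  induction xs with
  | nil => intro pre p hp; simp [PySem.List.enumerate_nil] at hp
  | cons x xs ih =>
    intro pre p hp
    rw [PySem.List.enumerate_cons] at hp
    rcases List.mem_cons.1 hp with h | h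
    · subst h
      simp [PySem.List.pyGetD_natCast, List.getD]
    · have h' : ((pre.length : Int) + 1) = (((pre ++ [x]).length : Int)) := by simp
      rw [h'] at h
      have := ih (pre ++ [x]) p h
      simpa [List.append_assoc] using this

-- every incident ridge index is an in-range enumerate index whose edge is a pair containing v
lemma pvRidgeL_extract (edges : List (List Int)) (v : Int) (r : Int)
    (hr : r ∈ pvRidgeL edges v) :
    ∃ (k : Nat) (a b : Int), r = (k : Int) ∧ k < edges.length ∧
      PySem.List.pyGetD edges r [] = [a, b] ∧ (v = a ∨ v = b) ∧
      r ∈ pvRidgeL edges a ∧ r ∈ pvRidgeL edges b := by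
  unfold pvRidgeL at hr
  obtain ⟨q, hqf, hq2⟩ := List.mem_map.1 hr
  obtain ⟨hqmem, hqv⟩ := List.mem_filter.1 hqf
  obtain ⟨p, hpmem, hcontrib⟩ := List.mem_flatMap.1 hqmem
  rcases p with ⟨i, e⟩
  rcases e with _ | ⟨a, _ | ⟨b, _ | ⟨c, t⟩⟩⟩
  all_goals simp at hcontrib
  have hq' : q = (a, i) ∨ q = (b, i) := hcontrib
  have hri : i = r := by rcases hq' with h | h <;> (subst h; simpa using hq2)
  subst hri
  obtain ⟨k, hk, hpk⟩ := (PySem.List.mem_enumerate_iff _ _ _).1 hpmem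
  have hik : i = (k : Int) := by simpa using congrArg Prod.fst hpk
  have hco : PySem.List.pyGetD edges i [] = [a, b] := by
    have := pvEnum_coherent edges [] (i, [a, b]) (by simpa using hpmem)
    simpa using this
  have hvab : v = a ∨ v = b := by
    rcases hq' with h | h <;> subst h
    · exact Or.inl (Eq.symm (by simpa using hqv))
    · exact Or.inr (Eq.symm (by simpa using hqv))
  have hmem : ∀ w, (w = a ∨ w = b) → i ∈ pvRidgeL edges w := by
    intro w hw
    unfold pvRidgeL
    refine List.mem_map.2 ⟨(w, i), List.mem_filter.2 ⟨List.mem_flatMap.2 ⟨(i, [a, b]), hpmem, ?_⟩, by simp⟩, rfl⟩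
    rcases hw with h | h <;> subst h <;> simp
  exact ⟨k, a, b, hik, hk, hco, hvab, hmem a (Or.inl rfl), hmem b (Or.inr rfl)⟩

-- membership of a vertex in an in-range pair edge puts the index into pvRidgeL
lemma pvMem_pvRidgeL (edges : List (List Int)) (h2 : ∀ e ∈ edges, e.length = 2)
    (k : Nat) (hk : k < edges.length) (cur : Int) (hcur : cur ∈ edges.getD k []) :
    (k : Int) ∈ pvRidgeL edges cur := by
  have hpmem : ((k : Int), edges[k]) ∈ PySem.List.enumerate edges := by
    rw [PySem.List.mem_enumerate_iff _ _ _]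
    exact ⟨k, hk, by simp⟩
  have hgd : edges.getD k [] = edges[k] := List.getD_eq_getElem edges [] hk
  obtain ⟨a, b, hab⟩ := List.length_eq_two.1 (h2 edges[k] (by simp))
  rw [hgd, hab] at hcur
  unfold pvRidgeL
  refine List.mem_map.2 ⟨(cur, (k : Int)), List.mem_filter.2 ⟨List.mem_flatMap.2
    ⟨((k : Int), edges[k]), hpmem, ?_⟩, by simp⟩, rfl⟩
  rw [hab]
  rcases List.mem_pair.1 hcur with h | h <;> simp [h]

lemma pvPairsA_count (l : List (Int × List Int)) (v : Int)
    (h : ∀ p ∈ l, p.2.length = 2) :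
    ((pvPairsA l).filter (fun q => q.1 == v)).length = ((l.map (·.2)).flatten.count v) := by
  induction l with
  | nil => rfl
  | cons p l ih =>
    have hp := h p (List.mem_cons_self ..)
    have hrest := fun q hq => h q (List.mem_cons_of_mem p hq)
    rcases p with ⟨i, e⟩
    rcases e with _ | ⟨a, _ | ⟨b, _ | ⟨c, t⟩⟩⟩ <;> simp_all [pvPairsA_cons]
    by_cases ha : a = v <;> by_cases hb : b = v <;>
      simp [List.filter_cons, ha, hb, ih] <;> omega

lemma pvRidgeL_length (edges : List (List Int)) (h2 : ∀ e ∈ edges, e.length = 2) (v : Int) :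
    (pvRidgeL edges v).length = edges.flatten.count v := by
  unfold pvRidgeL
  rw [List.length_map, pvPairsA_count _ v ?h2, PySem.List.map_snd_enumerate]
  intro p hp
  exact h2 p.2 ((PySem.List.map_snd_enumerate edges 0) ▸ List.mem_map_of_mem hp)

lemma pvPairsA_map_fst (l : List (Int × List Int)) (h : ∀ p ∈ l, p.2.length = 2) :
    (pvPairsA l).map (·.1) = (l.map (·.2)).flatten := by
  induction l with
  | nil => rfl
  | cons p l ih =>
    have hp := h p (List.mem_cons_self ..)
    have hrest := fun q hq => h q (List.mem_cons_of_mem p hq)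
    rcases p with ⟨i, e⟩
    rcases e with _ | ⟨a, _ | ⟨b, _ | ⟨c, t⟩⟩⟩ <;> simp_all [pvPairsA_cons]

-- counting (v, i) pairs: only edge i contributes, once per occurrence of v among its endpoints
lemma pvCount_lt (v : Int) : ∀ (es : List (List Int)) (s i : Int), i < s →
    (pvPairsA (PySem.List.enumerate es s)).count (v, i) = 0 := by
  intro es
  induction es with
  | nil => intro s i _; simp [PySem.List.enumerate_nil, pvPairsA]
  | cons e es ih =>
    intro s i hi
    rw [PySem.List.enumerate_cons, pvPairsA_cons, List.count_append,
      ih (s + 1) i (by omega)]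
    rcases e with _ | ⟨a, _ | ⟨b, _ | ⟨c, t⟩⟩⟩ <;>
      simp [List.count_cons, Prod.ext_iff] <;> omega

lemma pvCount_at (v : Int) : ∀ (es : List (List Int)) (s : Int) (k : Nat),
    k < es.length → (∀ e ∈ es, e.length = 2) →
    (pvPairsA (PySem.List.enumerate es s)).count (v, s + (k : Int)) = (es.getD k []).count v := by
  intro es
  induction es with
  | nil => intro s k hk _; simp at hk
  | cons e es ih =>
    intro s k hk h2
    obtain ⟨a, b, hab⟩ := List.length_eq_two.1 (h2 e (by simp))
    subst hab
    rw [PySem.List.enumerate_cons, pvPairsA_cons, List.count_append]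
    cases k with
    | zero =>
      have htail : (pvPairsA (PySem.List.enumerate es (s + 1))).count (v, s + ((0 : Nat) : Int)) = 0 :=
        pvCount_lt v es (s + 1) _ (by push_cast; omega)
      rw [htail]
      by_cases ha : a = v <;> by_cases hb : b = v <;>
        simp [List.count_cons, List.getD, Prod.ext_iff, ha, hb]
    | succ k =>
      have hhead : List.count (v, s + ((k + 1 : Nat) : Int)) [(a, s), (b, s)] = 0 := by
        simp [List.count_cons, Prod.ext_iff] <;> omega
      have htail := ih (s + 1) k (by simpa using hk) (fun e he => h2 e (by simp [he]))
      have harith : s + 1 + ((k : Nat) : Int) = s + ((k + 1 : Nat) : Int) := by push_cast; ring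
      rw [harith] at htail
      have hblock : (match ([a, b] : List Int) with
          | [a', b'] => [(a', s), (b', s)] | _ => ([] : List (Int × Int))) = [(a, s), (b, s)] := rfl
      rw [hblock, hhead, htail]
      simp [List.getD]

lemma pvCount_map_snd (v r : Int) : ∀ (l : List (Int × Int)),
    ((l.filter (fun q => q.1 == v)).map (·.2)).count r = l.count (v, r) := by
  intro l
  induction l with
  | nil => rfl
  | cons q l ih =>
    by_cases h1 : q.1 = v <;> by_cases h2 : q.2 = r <;>
      simp [List.filter_cons, List.count_cons, Prod.ext_iff, h1, h2, ih]

-- the incidence multiplicity of ridge k at v is the multiplicity of v among edge k's endpoints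
lemma pvDouble_edge (edges : List (List Int)) (h2 : ∀ e ∈ edges, e.length = 2)
    (v : Int) (k : Nat) (hk : k < edges.length) :
    (pvRidgeL edges v).count (k : Int) = (edges.getD k []).count v := by
  unfold pvRidgeL
  rw [pvCount_map_snd]
  have := pvCount_at v edges 0 k hk h2
  simpa using this

lemma pvFind?_congr_mem {α : Type} (l : List α) (f g : α → Bool)
    (h : ∀ x ∈ l, f x = g x) : l.find? f = l.find? g := by
  induction l with
  | nil => rfl
  | cons x l ih =>
    have hx := h x (List.mem_cons_self ..)
    by_cases hfx : f x = true
    · rw [List.find?_cons_of_pos hfx, List.find?_cons_of_pos (hx ▸ hfx)]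
    · have hfx' : f x = false := by simpa using hfx
      rw [List.find?_cons_of_neg (by simp [hfx']), List.find?_cons_of_neg (by simp [hx ▸ hfx']),
        ih (fun y hy => h y (List.mem_cons_of_mem x hy))]

lemma pvFind?_foldl_add (p : Int → Bool) : ∀ (l s : List Int),
    (l.foldl (fun s x => if x ∈ s then s else s ++ [x]) s).find? p =
      (s.find? p).or (l.find? p) := by
  intro l
  induction l with
  | nil => intro s; simp
  | cons x l ih =>
    intro s
    rw [List.foldl_cons, ih]
    by_cases hx : x ∈ s
    · rw [if_pos hx]
      by_cases hpx : p x = true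
      · obtain ⟨y, hy⟩ := Option.isSome_iff_exists.1 (List.find?_isSome.2 ⟨x, hx, hpx⟩)
        simp [hy]
      · have hpx' : p x = false := by simpa using hpx
        simp [List.find?_cons, hpx']
    · rw [if_neg hx, List.find?_append]
      by_cases hpx : p x = true <;> cases hs : s.find? p <;>
        simp_all [List.find?_cons]

-- the first enumerate entry whose index equals s+k
lemma pvFind?_at : ∀ (es : List (List Int)) (s k : Nat), k < es.length →
    (PySem.List.enumerate es (s : Int)).find? (fun p => p.1 == ((s + k : Nat) : Int)) =
      some (((s + k : Nat) : Int), es.getD k []) := by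
  intro es
  induction es with
  | nil => intro s k hk; simp at hk
  | cons e es ih =>
    intro s k hk
    rw [PySem.List.enumerate_cons]
    cases k with
    | zero => simp [List.find?_cons, List.getD]
    | succ k =>
      have hne : (((s : Int) == ((s + (k + 1) : Nat) : Int)) = false) := by
        simp; omega
      rw [List.find?_cons_of_neg (by simpa using hne)]
      have harith : ((s : Int) + 1) = (((s + 1 : Nat)) : Int) := by push_cast; ring
      rw [harith]
      have := ih (s + 1) k (by simpa using hk)
      have harith2 : ((s + 1 + k : Nat) : Int) = ((s + (k + 1) : Nat) : Int) := by
        push_cast; ring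
      rw [harith2] at this
      rw [this]
      simp [List.getD]

-- the pool: edges with the consumed (removed) indices masked out
def pvMask (R : List Int) : List (List Int) → Int → List (Option (List Int))
  | [], _ => []
  | e :: es, s => (if s ∈ R then none else some e) :: pvMask R es (s + 1)

lemma pvMask_nil : ∀ (es : List (List Int)) (s : Int), pvMask [] es s = es.map some := by
  intro es
  induction es with
  | nil => intro s; rfl
  | cons e es ih => intro s; simp [pvMask, ih]

lemma pvMask_append_lt (R : List Int) (v : Int) :
    ∀ (es : List (List Int)) (t : Int), v < t → pvMask (R ++ [v]) es t = pvMask R es t := by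
  intro es
  induction es with
  | nil => intro t _; rfl
  | cons e es ih =>
    intro t ht
    have hm : (t ∈ R ++ [v]) ↔ t ∈ R := by
      simp only [List.mem_append, List.mem_singleton]
      constructor
      · rintro (h | h)
        · exact h
        · exact absurd (h ▸ ht) (lt_irrefl v)
      · exact Or.inl
    simp only [pvMask, ih (t + 1) (by omega)]
    by_cases h : t ∈ R <;> simp [h, hm]

lemma pvMask_set (R : List Int) :
    ∀ (es : List (List Int)) (s : Int) (k : Nat),
      (pvMask R es s).set k none = pvMask (R ++ [s + (k : Int)]) es s := by
  intro es
  induction es with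
  | nil => intro s k; rfl
  | cons e es ih =>
    intro s k
    cases k with
    | zero =>
      simp only [pvMask, List.set]
      rw [pvMask_append_lt R _ es (s + 1) (by push_cast; omega)]
      simp
    | succ k =>
      simp only [pvMask, List.set]
      have hm : (s ∈ R ++ [s + ((k + 1 : Nat) : Int)]) ↔ s ∈ R := by
        simp only [List.mem_append, List.mem_singleton]
        constructor
        · rintro (h | h)
          · exact h
          · exact absurd h (by push_cast; omega)
        · exact Or.inl
      have htail := ih (s + 1) k
      have harith : s + 1 + ((k : Nat) : Int) = s + ((k + 1 : Nat) : Int) := by push_cast; ring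
      rw [harith] at htail
      rw [htail]
      congr 1
      exact (if_congr hm rfl rfl).symm

-- scanning the masked pool = scanning the edges for an unconsumed index containing cur
lemma pvFind_mask (R : List Int) (cur : Int) :
    ∀ (es : List (List Int)) (s : Int),
      (PySem.List.enumerate (pvMask R es s) s).find?
          (fun p => match p.2 with | some e => decide (cur ∈ e) | none => false) =
        ((PySem.List.enumerate es s).find?
            (fun p => decide (p.1 ∉ R) && decide (cur ∈ p.2))).map (fun p => (p.1, some p.2)) := by
  intro es
  induction es with
  | nil => intro s; simp [pvMask, PySem.List.enumerate_nil]
  | cons e es ih =>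
    intro s
    simp only [pvMask]
    rw [PySem.List.enumerate_cons, PySem.List.enumerate_cons]
    by_cases hs : s ∈ R
    · rw [if_pos hs]
      rw [List.find?_cons_of_neg (by simp)]
      rw [List.find?_cons_of_neg (by simp [hs])]
      exact ih (s + 1)
    · rw [if_neg hs]
      by_cases hc : cur ∈ e
      · rw [List.find?_cons_of_pos (by simpa using hc)]
        rw [List.find?_cons_of_pos (by simp [hs, hc])]
        rfl
      · rw [List.find?_cons_of_neg (by simpa using hc)]
        rw [List.find?_cons_of_neg (by simp [hc])]
        exact ih (s + 1)

-- the loop invariant: V is the path so far, R the consumed ridge indices, prev the last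
-- consumed ridge, cur the path end
def pvInv (edges : List (List Int)) (V R : List Int) (prev cur : Int) : Prop :=
  V.Nodup ∧ cur ∈ V ∧ prev ∈ pvRidgeL edges cur ∧ prev ∈ R ∧
  (∀ r ∈ R, ∀ v : Int, r ∈ pvRidgeL edges v → v ∈ V) ∧
  (∀ v ∈ V, v ≠ cur → ∀ r ∈ pvRidgeL edges v, r ∈ R) ∧
  (∀ r ∈ pvRidgeL edges cur, r ∈ R → r = prev) ∧
  (∃ p, p ≠ cur ∧ prev ∈ pvRidgeL edges p)

lemma pvLoop_eq (edges : List (List Int)) (vrm : PySem.Dict Int (List Int))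
    (hA : ∀ v, vrm.getD v [] = pvRidgeL edges v)
    (h2 : ∀ e ∈ edges, e.length = 2)
    (hdeg : ∀ v, (pvRidgeL edges v).length ≤ 2) :
    ∀ fuel V R prev cur, pvInv edges V R prev cur →
      pvA_loop edges vrm fuel V prev cur = pvB_loop fuel (pvMask R edges 0) V cur := by
  intro fuel
  induction fuel with
  | zero => intro V R prev cur _; rfl
  | succ fuel ih =>
    intro V R prev cur hinv
    obtain ⟨hnd, hcV, hprevL, hprevR, hR_V, hV_R, huniq, p0, hp0ne, hp0⟩ := hinv
    simp only [pvA_loop, pvB_loop, hA]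
    rw [pvFind_mask]
    by_cases h1 : (pvRidgeL edges cur).length = 1
    · -- stop: the only incident ridge is prev, already consumed
      have hfind : ((PySem.List.enumerate edges).find?
          (fun p => decide (p.1 ∉ R) && decide (cur ∈ p.2))) = none := by
        rw [List.find?_eq_none]
        intro q hq
        obtain ⟨k, hk, hqk⟩ := (PySem.List.mem_enumerate_iff _ _ _).1 hq
        subst hqk
        intro hq'
        simp only [Bool.and_eq_true, decide_eq_true_eq] at hq'
        obtain ⟨hnR, hcur⟩ := hq'
        have hmem : ((k : Nat) : Int) ∈ pvRidgeL edges cur := by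
          apply pvMem_pvRidgeL edges h2 k hk cur
          rw [List.getD_eq_getElem edges [] hk]
          simpa using hcur
        obtain ⟨x, hx⟩ := List.length_eq_one_iff.1 h1
        rw [hx] at hmem hprevL
        have h1' : ((0 : Int) + k) = prev := by
          have := (List.mem_singleton.1 hmem).trans (List.mem_singleton.1 hprevL).symm
          simpa using this
        exact hnR (by rw [h1']; exact hprevR)
      rw [hfind]
      simp [h1]
    · -- step: exactly two incident ridges, consume the unconsumed one
      have hlen2 : (pvRidgeL edges cur).length = 2 := by
        have := hdeg cur
        have := List.length_pos_of_ne_nil (List.ne_nil_of_mem hprevL)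
        omega
      obtain ⟨x, y, hxy⟩ := List.length_eq_two.1 hlen2
      have hx_mem : x ∈ pvRidgeL edges cur := by rw [hxy]; simp
      have hy_mem : y ∈ pvRidgeL edges cur := by rw [hxy]; simp
      have hprev_xy : prev = x ∨ prev = y := by rw [hxy] at hprevL; simpa using hprevL
      -- x ≠ y: a doubled incidence would mean the prev edge is [cur, cur], impossible
      have hxney : x ≠ y := by
        intro hcon
        have hpx : prev = x := by
          rcases hprev_xy with h | h
          · exact h
          · exact h.trans hcon.symm
        obtain ⟨k, a, b, hrk, hk, hco, hvab, _, _⟩ := pvRidgeL_extract edges cur _ hprevL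
        have hcount := pvDouble_edge edges h2 cur k hk
        rw [← hrk, hxy] at hcount
        have hcnt2 : ([x, y] : List Int).count prev = 2 := by
          have hyp : y = prev := hcon.symm.trans hpx.symm
          rw [show x = prev from hpx.symm, hyp]
          simp
        rw [hcnt2] at hcount
        have hgd : edges.getD k [] = [a, b] := by
          rw [← PySem.List.pyGetD_natCast (n := k) (d := ([] : List Int)), ← hrk, hco]
        rw [hgd] at hcount
        have hab : a = cur ∧ b = cur := by
          by_cases ha : a = cur <;> by_cases hb : b = cur <;>
            simp [List.count_cons, ha, hb] at hcount <;> tauto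
        obtain ⟨k2, a2, b2, hrk2, hk2, hco2, hvab2, _, _⟩ := pvRidgeL_extract edges p0 _ hp0
        have heq : ([a, b] : List Int) = [a2, b2] := hco.symm.trans hco2
        have ha2 : a2 = a := by injection heq with h1 _; exact h1.symm
        have hb2 : b2 = b := by
          injection heq with _ h2'; injection h2' with h3 _; exact h3.symm
        have : p0 = cur := by
          rcases hvab2 with h | h
          · rw [h, ha2]; exact hab.1
          · rw [h, hb2]; exact hab.2
        exact hp0ne this
      -- which of the two incident ridges A consumes
      have hcover : ∀ z, (z = x ∨ z = y) → z = prev ∨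
          z = (if x == prev then y else x) := by
        intro z hz
        rcases hprev_xy with h | h
        · rw [if_pos (by simp [h.symm])]
          rcases hz with hz | hz
          · exact Or.inl (hz.trans h.symm)
          · exact Or.inr hz
        · have hxp : ¬ (x = prev) := fun hcon => hxney (hcon.trans h)
          rw [if_neg (by simpa using hxp)]
          rcases hz with hz | hz
          · exact Or.inr hz
          · exact Or.inl (hz.trans h.symm)
      have hgd01 : (pvRidgeL edges cur).getD 0 0 = x ∧ (pvRidgeL edges cur).getD 1 0 = y := by
        rw [hxy]; exact ⟨rfl, rfl⟩
      set r := if x == prev then y else x with hrdef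
      have hr_mem : r ∈ pvRidgeL edges cur := by
        rw [hrdef]; by_cases h : x = prev <;> simp [h, hx_mem, hy_mem]
      have hr_ne_prev : r ≠ prev := by
        rw [hrdef]
        rcases hprev_xy with h | h
        · rw [if_pos (by simp [h.symm])]
          exact fun hcon => hxney (h ▸ hcon.symm)
        · have hxp : ¬ (x = prev) := fun hcon => hxney (hcon.trans h)
          rw [if_neg (by simpa using hxp)]
          exact fun hcon => hxp hcon
      have hr_nR : r ∉ R := fun hcon => hr_ne_prev (huniq r hr_mem hcon)
      obtain ⟨kr, a, b, hrk, hkr, hco, hcur_ab, hra, hrb⟩ := pvRidgeL_extract edges cur r hr_mem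
      have hgd : edges.getD kr [] = [a, b] := by
        rw [← PySem.List.pyGetD_natCast (n := kr) (d := ([] : List Int)), ← hrk, hco]
      -- B's scan finds exactly ridge r
      have hfind : ((PySem.List.enumerate edges).find?
          (fun p => decide (p.1 ∉ R) && decide (cur ∈ p.2))) = some (r, edges.getD kr []) := by
        rw [pvFind?_congr_mem _ _ (fun p => p.1 == r) ?hcongr]
        · have hat := pvFind?_at edges 0 kr hkr
          simp only [Nat.zero_add, Nat.cast_zero] at hat
          rw [← hrk] at hat
          exact hat
        case hcongr =>
          intro q hq
          obtain ⟨k, hk, hqk⟩ := (PySem.List.mem_enumerate_iff _ _ _).1 hq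
          subst hqk
          by_cases heq : ((0 : Int) + k) = r
          · have hkkr : k = kr := by
              have : ((k : Nat) : Int) = ((kr : Nat) : Int) := by rw [← hrk]; omega
              exact_mod_cast this
            subst hkkr
            have hcur_in : cur ∈ edges[k] := by
              have : edges.getD k [] = edges[k] := List.getD_eq_getElem edges [] hk
              rw [← this, hgd]
              rcases hcur_ab with h | h <;> simp [h]
            simp [heq, hr_nR, hcur_in]
          · by_cases hcm : cur ∈ edges[k]
            · have hmem : ((0 : Int) + k) ∈ pvRidgeL edges cur := by
                have := pvMem_pvRidgeL edges h2 k hk cur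
                  (by rw [List.getD_eq_getElem edges [] hk]; exact hcm)
                simpa using this
              have hxyz : ((0 : Int) + k) = x ∨ ((0 : Int) + k) = y := by
                rw [hxy] at hmem; simpa using hmem
              rcases hcover _ hxyz with hp | hp
              · simp [hp, hprevR]
                exact fun hc => hr_ne_prev hc.symm
              · exact absurd (hp.trans hrdef.symm) heq
            · simp [hcm]
              intro hc
              exact heq (by omega)
      rw [hfind]
      -- both sides take one step to the same state
      have hlen_ne : ((pvRidgeL edges cur).length == 1) = false := by
        simp [hlen2]
      rw [hgd01.1, hgd01.2]
      simp only [hlen_ne, Bool.false_eq_true, if_false, Option.map_some]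
      rw [hgd, hco]
      simp only [List.getD_cons_zero, List.getD_cons_succ]
      -- the next vertex
      set v := if a == cur then b else a with hvdef
      have hv_ab : v = a ∨ v = b := by
        rw [hvdef]; by_cases h : a = cur <;> simp [h]
      have hr_v : r ∈ pvRidgeL edges v := by
        rcases hv_ab with h | h <;> rw [h]
        · exact hra
        · exact hrb
      have hv_ne_cur : v ≠ cur := by
        rw [hvdef]
        by_cases h : a = cur
        · rw [if_pos (by simp [h])]
          intro hbc
          have hcount := pvDouble_edge edges h2 cur kr hkr
          rw [← hrk, hxy, hgd] at hcount
          have hc2 : ([a, b] : List Int).count cur = 2 := by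
            rw [h, hbc]; simp
          rw [hc2] at hcount
          have hxr : x = r ∧ y = r := by
            by_cases hx : x = r <;> by_cases hy : y = r <;>
              simp [List.count_cons, hx, hy] at hcount <;> tauto
          apply hr_ne_prev
          rcases hprev_xy with hh | hh
          · exact (hh.trans hxr.1).symm
          · exact (hh.trans hxr.2).symm
        · rw [if_neg (by simpa using h)]
          exact h
      have hv_not_V : v ∉ V := by
        intro hvV
        exact hr_nR (hV_R v hvV hv_ne_cur r hr_v)
      -- {a, b} = {cur, v}
      have hab_cv : ∀ w : Int, (w = a ∨ w = b) → w = cur ∨ w = v := by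
        intro w hw
        rw [hvdef]
        by_cases h : a = cur
        · rw [if_pos (by simp [h])]
          rcases hw with hh | hh
          · exact Or.inl (hh.trans h)
          · exact Or.inr hh
        · rw [if_neg (by simpa using h)]
          have hbc : b = cur := by
            rcases hcur_ab with hh | hh
            · exact absurd hh.symm h
            · exact hh.symm
          rcases hw with hh | hh
          · exact Or.inr hh
          · exact Or.inl (hh.trans hbc)
      -- the new invariant
      have hinv' : pvInv edges (V ++ [v]) (R ++ [r]) r v := by
        refine ⟨List.Nodup.append hnd (List.nodup_singleton v) (by simpa using hv_not_V),
          by simp, hr_v, by simp, ?_, ?_, ?_, ⟨cur, fun hcon => hv_ne_cur hcon.symm, hr_mem⟩⟩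
        · intro rr hrr w hw
          rcases List.mem_append.1 hrr with hrr | hrr
          · exact List.mem_append.2 (Or.inl (hR_V rr hrr w hw))
          · have hrrr : rr = r := by simpa using hrr
            subst hrrr
            obtain ⟨k2, a2, b2, hrk2, hk2, hco2, hvab2, _, _⟩ := pvRidgeL_extract edges w _ hw
            have heq2 : ([a, b] : List Int) = [a2, b2] := hco.symm.trans hco2
            have ha2 : a2 = a := by injection heq2 with hh1 _; exact hh1.symm
            have hb2 : b2 = b := by
              injection heq2 with _ hh2; injection hh2 with hh3 _; exact hh3.symm
            have hwab : w = a ∨ w = b := by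
              rcases hvab2 with hh | hh
              · exact Or.inl (hh.trans ha2)
              · exact Or.inr (hh.trans hb2)
            rcases hab_cv w hwab with hh | hh
            · exact List.mem_append.2 (Or.inl (hh ▸ hcV))
            · exact List.mem_append.2 (Or.inr (by simp [hh]))
        · intro w hw hwne rr hrr
          rcases List.mem_append.1 hw with hw | hw
          · by_cases hwc : w = cur
            · subst hwc
              rw [hxy] at hrr
              have hxyz : rr = x ∨ rr = y := by simpa using hrr
              rcases hcover rr hxyz with hp | hp
              · exact List.mem_append.2 (Or.inl (by rw [hp]; exact hprevR))
              · exact List.mem_append.2 (Or.inr (by simp [hp]))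
            · exact List.mem_append.2 (Or.inl (hV_R w hw hwc rr hrr))
          · exact absurd (by simpa using hw) hwne
        · intro rr hrr hrR
          rcases List.mem_append.1 hrR with hh | hh
          · exact absurd (hR_V rr hh v hrr) hv_not_V
          · simpa using hh
      have hstep := ih (V ++ [v]) (R ++ [r]) r v hinv'
      -- align B's pool update
      have hmask : (pvMask R edges 0).set r.toNat none = pvMask (R ++ [r]) edges 0 := by
        have htn : r.toNat = kr := by rw [hrk]; simp
        rw [htn, pvMask_set R edges 0 kr]
        have h0 : (0 : Int) + (kr : Int) = r := by rw [hrk]; ring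
        rw [h0]
      rw [← hmask] at hstep
      exact hstep

theorem order_ridge_vertices_spec : Claim_equal_order_ridge_vertices := by
  intro edges _hdom hpre
  obtain ⟨h2, hdeg2, _⟩ := hpre
  unfold Spec_order_ridge_vertices order_ridge_vertices order_ridge_vertices_alt
  rw [pvA_build_pairs]
  dsimp only
  have h2e : ∀ p ∈ PySem.List.enumerate edges 0, (p.2).length = 2 := by
    intro p hp
    exact h2 p.2 ((PySem.List.map_snd_enumerate edges 0) ▸ List.mem_map_of_mem hp)
  have hA : ∀ v, ((pvPairsA (PySem.List.enumerate edges 0)).foldl pvStep PySem.Dict.empty).getD v []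
      = pvRidgeL edges v := by
    intro v
    rw [pvStep_getD]
    simp [pvRidgeL, PySem.Dict.getD_empty]
  have hdeg : ∀ v, (pvRidgeL edges v).length ≤ 2 := by
    intro v
    rw [pvRidgeL_length edges h2 v]
    by_cases hv : v ∈ edges.flatten
    · exact hdeg2 v hv
    · simp [List.count_eq_zero_of_not_mem hv]
  have hnod := pvNodup_fold (pvPairsA (PySem.List.enumerate edges 0)) PySem.Dict.empty
    PySem.Dict.nodup_keys_empty
  -- A's start search over dict items = a search over the flattened edge list
  rw [PySem.Dict.items_eq_map_keys _ hnod [], List.find?_map]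
  have hpredA : ((fun kv : Int × List Int => kv.2.length == 1) ∘
      (fun k => (k, ((pvPairsA (PySem.List.enumerate edges 0)).foldl pvStep PySem.Dict.empty).getD k [])))
      = fun k => (pvRidgeL edges k).length == 1 := by
    funext k; simp [hA]
  have hkeys : ((pvPairsA (PySem.List.enumerate edges 0)).foldl pvStep PySem.Dict.empty).keys
      = ((pvPairsA (PySem.List.enumerate edges 0)).map (·.1)).foldl
          (fun s x => if x ∈ s then s else s ++ [x]) [] := by
    have h1 := PySem.Dict.keys_foldl_modify_key (pvPairsA (PySem.List.enumerate edges 0))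
      (·.1) ([] : List Int) (fun _ x => (· ++ [x.2])) PySem.Dict.empty
    rw [show ((pvPairsA (PySem.List.enumerate edges 0)).foldl pvStep PySem.Dict.empty) =
      ((pvPairsA (PySem.List.enumerate edges 0)).foldl
        (fun d x => d.modify x.1 [] ((fun _ x => (· ++ [x.2])) d x)) PySem.Dict.empty) from rfl, h1]
    rw [PySem.Dict.keys_empty, PySem.Set.update_nil_left, PySem.Set.ofList_eq_foldl]
    exact PySem.List.foldl_congr_mem _ _ _ _ (fun acc x _ => PySem.Set.add_eq_ite acc x)
  have hflat : (pvPairsA (PySem.List.enumerate edges 0)).map (·.1) = edges.flatten := by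
    rw [pvPairsA_map_fst _ h2e, PySem.List.map_snd_enumerate]
  rw [hpredA, hkeys, hflat, pvFind?_foldl_add]
  simp only [List.find?_nil, Option.none_or]
  -- B's counter = occurrence counts in the flattened edge list
  have hcnt : edges.foldl (fun d e => e.foldl (fun d v => d.insert v (d.getD v 0 + 1)) d)
      PySem.Dict.empty = PySem.Dict.counter edges.flatten := by
    rw [← PySem.Dict.foldl_insert_getD_add_one_eq_counter, List.foldl_flatten]
  have hpredB : (fun v => (edges.foldl (fun d e => e.foldl
        (fun d v => d.insert v (d.getD v (0 : Int) + 1)) d) PySem.Dict.empty).getD v (0 : Int) == 1)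
      = fun v => (pvRidgeL edges v).length == 1 := by
    funext v
    simp only [← List.foldl_flatten, PySem.Dict.foldl_insert_getD_add_one_eq_counter,
      PySem.Dict.getD_counter, pvRidgeL_length edges h2 v]
    simp
  rw [hpredB]
  -- both programs now search the same list with the same predicate
  cases hfind : edges.flatten.find? (fun v => (pvRidgeL edges v).length == 1) with
  | none => rfl
  | some s =>
    simp only [Option.map_some]
    have hs1 : (pvRidgeL edges s).length = 1 := by
      have := List.find?_some hfind
      simpa using this
    obtain ⟨r0, hr0⟩ := List.length_eq_one_iff.1 hs1
    have hr0_mem : r0 ∈ pvRidgeL edges s := by rw [hr0]; simp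
    obtain ⟨k0, a, b, hrk0, hk0, hco0, hs_ab, hr0a, hr0b⟩ := pvRidgeL_extract edges s r0 hr0_mem
    have hgd0 : edges.getD k0 [] = [a, b] := by
      rw [← PySem.List.pyGetD_natCast (n := k0) (d := ([] : List Int)), ← hrk0, hco0]
    rw [hA, hr0]
    simp only [List.getD_cons_zero]
    rw [hco0]
    -- unfold B's first step
    show pvA_loop edges _ (edges.length + 1) [s, if ([a,b].getD 0 0) == s then [a,b].getD 1 0 else [a,b].getD 0 0] r0
        (if ([a,b].getD 0 0) == s then [a,b].getD 1 0 else [a,b].getD 0 0)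
      = pvB_loop (edges.length + 1 + 1) (edges.map some) [s] s
    set v := if a == s then b else a with hvdef
    have hv_simp : (if ([a,b].getD 0 0) == s then [a,b].getD 1 0 else [a,b].getD 0 0) = v := by
      simp [hvdef, List.getD]
    rw [hv_simp]
    have hfind0 : ((PySem.List.enumerate edges).find?
        (fun p => decide (p.1 ∉ ([] : List Int)) && decide (s ∈ p.2))) = some (r0, edges.getD k0 []) := by
      rw [pvFind?_congr_mem _ _ (fun p => p.1 == r0) ?hcongr]
      · have hat := pvFind?_at edges 0 k0 hk0
        simp only [Nat.zero_add, Nat.cast_zero] at hat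
        rw [← hrk0] at hat
        exact hat
      case hcongr =>
        intro q hq
        obtain ⟨k, hk, hqk⟩ := (PySem.List.mem_enumerate_iff _ _ _).1 hq
        subst hqk
        by_cases hcm : s ∈ edges[k]
        · have hmem : ((0 : Int) + k) ∈ pvRidgeL edges s := by
            have := pvMem_pvRidgeL edges h2 k hk s
              (by rw [List.getD_eq_getElem edges [] hk]; exact hcm)
            simpa using this
          rw [hr0] at hmem
          have : ((0 : Int) + k) = r0 := by simpa using hmem
          simp [this, hcm]
        · have : ¬ (((0 : Int) + k) = r0) := by
            intro hcon
            apply hcm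
            have hkk0 : k = k0 := by
              have : ((k : Nat) : Int) = ((k0 : Nat) : Int) := by rw [← hrk0]; omega
              exact_mod_cast this
            subst hkk0
            rw [← List.getD_eq_getElem edges [] hk, hgd0]
            rcases hs_ab with h | h <;> simp [h]
          simp [hcm]
          intro hc
          exact this (by omega)
    have hB1 : pvB_loop (edges.length + 1 + 1) (edges.map some) [s] s
        = pvB_loop (edges.length + 1) (pvMask [r0] edges 0) [s, v] v := by
      rw [show (edges.map some) = pvMask [] edges 0 from (pvMask_nil edges 0).symm]
      simp only [pvB_loop]
      rw [pvFind_mask, hfind0]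
      simp only [Option.map_some]
      rw [hgd0]
      have hmask : (pvMask ([] : List Int) edges 0).set r0.toNat none = pvMask [r0] edges 0 := by
        have htn : r0.toNat = k0 := by rw [hrk0]; simp
        rw [htn, pvMask_set ([] : List Int) edges 0 k0]
        have h0 : (0 : Int) + (k0 : Int) = r0 := by rw [hrk0]; ring
        rw [h0, List.nil_append]
      rw [hmask]
      rw [hvdef]
      rfl
    rw [hB1]
    -- initial invariant for the lockstep walk
    have hv_ne_s : v ≠ s := by
      rw [hvdef]
      by_cases h : a = s
      · rw [if_pos (by simp [h])]
        intro hbs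
        have hcount := pvDouble_edge edges h2 s k0 hk0
        rw [← hrk0, hr0, hgd0] at hcount
        have hc2 : ([a, b] : List Int).count s = 2 := by rw [h, hbs]; simp
        rw [hc2] at hcount
        simp [List.count_cons] at hcount
      · rw [if_neg (by simpa using h)]
        exact h
    have hv_ab : v = a ∨ v = b := by
      rw [hvdef]; by_cases h : a = s <;> simp [h]
    have hr0_v : r0 ∈ pvRidgeL edges v := by
      rcases hv_ab with h | h <;> rw [h]
      · exact hr0a
      · exact hr0b
    have hab_sv : ∀ w : Int, (w = a ∨ w = b) → w = s ∨ w = v := by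
      intro w hw
      rw [hvdef]
      by_cases h : a = s
      · rw [if_pos (by simp [h])]
        rcases hw with hh | hh
        · exact Or.inl (hh.trans h)
        · exact Or.inr hh
      · rw [if_neg (by simpa using h)]
        have hbs : b = s := by
          rcases hs_ab with hh | hh
          · exact absurd hh.symm h
          · exact hh.symm
        rcases hw with hh | hh
        · exact Or.inr hh
        · exact Or.inl (hh.trans hbs)
    have hinv0 : pvInv edges [s, v] [r0] r0 v := by
      refine ⟨by simp [hv_ne_s.symm], by simp, hr0_v, by simp, ?_, ?_, ?_,
        ⟨s, fun hcon => hv_ne_s hcon.symm, hr0_mem⟩⟩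
      · intro rr hrr w hw
        have hrrr : rr = r0 := by simpa using hrr
        subst hrrr
        obtain ⟨k2, a2, b2, hrk2, hk2, hco2, hvab2, _, _⟩ := pvRidgeL_extract edges w _ hw
        have heq2 : ([a, b] : List Int) = [a2, b2] := hco0.symm.trans hco2
        have ha2 : a2 = a := by injection heq2 with hh1 _; exact hh1.symm
        have hb2 : b2 = b := by
          injection heq2 with _ hh2; injection hh2 with hh3 _; exact hh3.symm
        have hwab : w = a ∨ w = b := by
          rcases hvab2 with hh | hh
          · exact Or.inl (hh.trans ha2)
          · exact Or.inr (hh.trans hb2)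
        rcases hab_sv w hwab with hh | hh <;> simp [hh]
      · intro w hw hwne rr hrr
        have hws : w = s := by
          rcases (by simpa using hw : w = s ∨ w = v) with hh | hh
          · exact hh
          · exact absurd hh hwne
        subst hws
        rw [hr0] at hrr
        simpa using hrr
      · intro rr hrr hrR
        simpa using hrR
    exact pvLoop_eq edges _ hA h2 hdeg (edges.length + 1) [s, v] [r0] r0 v hinv0
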